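-- pv_equiv track=rewrite | github.com/Kin-Engineer/double_ball_analyzer | data/models.py | _calculate_zone_distribution
-- ===== SOURCE A (Python) =====
-- def _calculate_zone_distribution(red_balls):
--     """计算三区分布"""
--     zone1 = sum(1 for x in red_balls if 1 <= x <= 11)
--     zone2 = sum(1 for x in red_balls if 12 <= x <= 22)
--     zone3 = sum(1 for x in red_balls if 23 <= x <= 33)
--
--     return {
--         '一区(01-11)': zone1,
--         '二区(12-22)': zone2,
--         '三区(23-33)': zone3
--     }
-- ===== SOURCE B (Python) =====
-- def _calculate_zone_distribution(red_balls):
--     """计算三区分布"""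
--     zone1 = zone2 = zone3 = 0
--     for x in red_balls:
--         if 1 <= x <= 11:
--             zone1 += 1
--         elif 12 <= x <= 22:
--             zone2 += 1
--         elif 23 <= x <= 33:
--             zone3 += 1
--     return {
--         '一区(01-11)': zone1,
--         '二区(12-22)': zone2,
--         '三区(23-33)': zone3
--     }
-- ===== Notes on version B (the rewrite author's own statement) =====
-- stated objective: simpler
-- what changed: Replaced the three separate generator-sum passes over red_balls with one loop maintaining three counters via an if/elif chain.
import Mathlib
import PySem

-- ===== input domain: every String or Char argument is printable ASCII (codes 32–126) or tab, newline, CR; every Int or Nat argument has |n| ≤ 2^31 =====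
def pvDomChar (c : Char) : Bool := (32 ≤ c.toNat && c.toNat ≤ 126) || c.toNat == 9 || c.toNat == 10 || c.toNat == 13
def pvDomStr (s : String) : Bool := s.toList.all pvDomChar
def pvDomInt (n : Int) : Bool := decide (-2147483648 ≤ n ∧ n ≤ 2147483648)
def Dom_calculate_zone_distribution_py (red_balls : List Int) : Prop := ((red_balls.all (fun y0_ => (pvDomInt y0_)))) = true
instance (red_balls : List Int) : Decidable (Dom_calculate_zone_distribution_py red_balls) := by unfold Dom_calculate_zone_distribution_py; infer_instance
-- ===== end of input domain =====

-- ===== PORT A =====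
-- A: three separate sum-comprehension passes
def calculate_zone_distribution_py (red_balls : List Int) : List (String × Int) :=
  let zone1 : Int := ((red_balls.filter (fun x => 1 ≤ x ∧ x ≤ 11)).map (fun _ => (1 : Int))).sum
  let zone2 : Int := ((red_balls.filter (fun x => 12 ≤ x ∧ x ≤ 22)).map (fun _ => (1 : Int))).sum
  let zone3 : Int := ((red_balls.filter (fun x => 23 ≤ x ∧ x ≤ 33)).map (fun _ => (1 : Int))).sum
  [("一区(01-11)", zone1), ("二区(12-22)", zone2), ("三区(23-33)", zone3)]

-- ===== PORT B =====
-- B: one loop over red_balls updating three counters with an if/elif chain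
def calculate_zone_distribution_py_alt (red_balls : List Int) : List (String × Int) :=
  let z := red_balls.foldl (fun (z : Int × Int × Int) x =>
    if 1 ≤ x ∧ x ≤ 11 then (z.1 + 1, z.2.1, z.2.2)
    else if 12 ≤ x ∧ x ≤ 22 then (z.1, z.2.1 + 1, z.2.2)
    else if 23 ≤ x ∧ x ≤ 33 then (z.1, z.2.1, z.2.2 + 1)
    else z) (0, 0, 0)
  [("一区(01-11)", z.1), ("二区(12-22)", z.2.1), ("三区(23-33)", z.2.2)]

-- ===== PRECONDITION & SPEC =====
def Spec_calculate_zone_distribution_py (red_balls : List Int) (out : List (String × Int)) : Prop := out = calculate_zone_distribution_py_alt red_balls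
instance (red_balls : List Int) (out : List (String × Int)) : Decidable (Spec_calculate_zone_distribution_py red_balls out) := by unfold Spec_calculate_zone_distribution_py; infer_instance

-- ===== CLAIM (what is proved, stated in full; the proofs are below) =====
def Claim_equal_calculate_zone_distribution_py : Prop := ∀ (red_balls : List Int), Dom_calculate_zone_distribution_py red_balls → Spec_calculate_zone_distribution_py red_balls (calculate_zone_distribution_py red_balls)

-- ===== LEMMAS AND PROOFS =====

-- ===== VERDICT (by name: the statement is the Claim_ definition above) =====
lemma fold_inv (xs : List Int) (a b c : Int) :
    xs.foldl (fun (z : Int × Int × Int) x =>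
      if 1 ≤ x ∧ x ≤ 11 then (z.1 + 1, z.2.1, z.2.2)
      else if 12 ≤ x ∧ x ≤ 22 then (z.1, z.2.1 + 1, z.2.2)
      else if 23 ≤ x ∧ x ≤ 33 then (z.1, z.2.1, z.2.2 + 1)
      else z) (a, b, c) =
    (a + ((xs.filter (fun x => 1 ≤ x ∧ x ≤ 11)).map (fun _ => (1 : Int))).sum,
     b + ((xs.filter (fun x => 12 ≤ x ∧ x ≤ 22)).map (fun _ => (1 : Int))).sum,
     c + ((xs.filter (fun x => 23 ≤ x ∧ x ≤ 33)).map (fun _ => (1 : Int))).sum) := by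
  induction xs generalizing a b c with
  | nil => simp
  | cons y ys ih =>
    simp only [List.foldl_cons, List.filter_cons]
    by_cases h1 : 1 ≤ y ∧ y ≤ 11 <;> by_cases h2 : 12 ≤ y ∧ y ≤ 22 <;>
      by_cases h3 : 23 ≤ y ∧ y ≤ 33 <;>
      simp [h1, h2, h3, ih] <;> omega

theorem calculate_zone_distribution_py_spec : Claim_equal_calculate_zone_distribution_py := by
  intro red_balls _
  unfold Spec_calculate_zone_distribution_py calculate_zone_distribution_py calculate_zone_distribution_py_alt
  simp [fold_inv]
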